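-- pv_equiv track=rewrite | github.com/OpenTreeOfLife/peyotl | peyotl/string/__init__.py | find_intervening_fragments
-- ===== SOURCE A (Python) =====
-- def find_intervening_fragments(input_str,
--                                expected_str_list,
--                                start_pos=0,
--                                case_sensitive=False,
--                                template_i=None,
--                                curr_word_ind=0,
--                                curr_result=None):
--     '''Returns a list of lists of prefixes, intervening fragments, and suffixes
--     that are in input_str but not expected_str_list.
--     the length of the returned list will be one longer that the length of expected_str_list
--
--     Returns None if input_str does not contain the fragments in expected_str_list
--
--     r = find_intervening_fragments(x, y, case_sensitive=True)
--     if r is not None: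
--         for possible in r:
--             z = [possible[0]]
--             for i in range(1:len(possible)):
--                 z.append(y[i -1])
--                 z.append(possible[i])
--             assert ''.join(z) == x
--     '''
--     last_ind = len(input_str) - sum([len(i) for i in expected_str_list])
--     if last_ind < 0:
--         return None
--     if case_sensitive:
--         istr, elist = input_str, expected_str_list
--         if template_i is None:
--             template_i = istr
--     else:
--         istr = input_str.lower()
--         expected_str_list = [i.lower() for i in expected_str_list]
--         if template_i is None:
--             template_i = input_str
--     try:
--         curr_word = expected_str_list[curr_word_ind]
--     except IndexError:
--         return None
--     noff = istr.find(curr_word, start_pos)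
--     #_LOG.debug('{c} at {n} of {t} (called with start_pos={s})'.format(c=curr_word, n=noff, t=template_i, s=start_pos))
--     if noff < 0:
--         return None
--     if noff < last_ind:
--         #_LOG.debug('one match found. checking tail...')
--         tail_results = find_intervening_fragments(istr,
--                                                   expected_str_list,
--                                                   start_pos=1+noff,
--                                                   case_sensitive=True,
--                                                   template_i=template_i,
--                                                   curr_word_ind=curr_word_ind)
--     else:
--         tail_results = None
--     if curr_result is None:
--         curr_result = [template_i[:noff]]
--     else:
--         curr_result = list(curr_result) # make a copy because this is recursive
--         curr_result.append(template_i[start_pos:noff])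
--     #_LOG.debug('curr_result = {x}'.format(x=repr(curr_result)))
--     curr_word_ind += 1
--     offset = noff + len(curr_word)
--     if curr_word_ind >= len(expected_str_list):
--         curr_result.append(template_i[offset:])
--         boxed_cr = [curr_result]
--         if tail_results is not None:
--             boxed_cr.extend(tail_results)
--         return boxed_cr
--     #_LOG.debug('more words found. continuing check...')
--     continued_results = find_intervening_fragments(istr,
--                                                    expected_str_list,
--                                                    start_pos=offset,
--                                                    case_sensitive=True,
--                                                    template_i=template_i,
--                                                    curr_word_ind=curr_word_ind,
--                                                    curr_result=curr_result)
--     if continued_results is None: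
--         return tail_results
--     if tail_results is not None:
--         continued_results.extend(tail_results)
--     return continued_results
-- ===== SOURCE B (Python) =====
-- def find_intervening_fragments(input_str,
--                                expected_str_list,
--                                start_pos=0,
--                                case_sensitive=False,
--                                template_i=None,
--                                curr_word_ind=0,
--                                curr_result=None):
--     template = input_str if template_i is None else template_i
--     if case_sensitive:
--         text, words = input_str, expected_str_list
--     else:
--         text = input_str.lower()
--         words = [w.lower() for w in expected_str_list]
--     last = len(text) - sum(len(w) for w in words)
--     if last < 0:
--         return None  # the words cannot all fit into the string
--     out = []
--     stack = [(curr_word_ind, start_pos, curr_result)]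
--     while stack:
--         ind, pos, acc = stack.pop()
--         try:
--             word = words[ind]
--         except IndexError:
--             continue
--         hit = text.find(word, pos)
--         if hit < 0:
--             continue
--         if hit < last:
--             stack.append((ind, hit + 1, None))
--         frags = [template[:hit]] if acc is None else list(acc) + [template[pos:hit]]
--         end = hit + len(word)
--         if ind + 1 >= len(words):
--             out.append(frags + [template[end:]])
--         else:
--             stack.append((ind + 1, end, frags))
--     return out or None
-- ===== Notes on version B (the rewrite author's own statement) =====
-- stated objective: alternative
-- what changed: Replaces A's self-recursion with None-threading (tail and continued results merged by nested None checks at every level, case/template normalisation re-dispatched through the recursion's keyword arguments on each call) by a single up-front normalisation plus an explicit-stack loop over (word index, search position, accumulated fragments) frames that appends each complete decomposition to one output list and returns None exactly when that list is empty.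
import Mathlib
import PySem

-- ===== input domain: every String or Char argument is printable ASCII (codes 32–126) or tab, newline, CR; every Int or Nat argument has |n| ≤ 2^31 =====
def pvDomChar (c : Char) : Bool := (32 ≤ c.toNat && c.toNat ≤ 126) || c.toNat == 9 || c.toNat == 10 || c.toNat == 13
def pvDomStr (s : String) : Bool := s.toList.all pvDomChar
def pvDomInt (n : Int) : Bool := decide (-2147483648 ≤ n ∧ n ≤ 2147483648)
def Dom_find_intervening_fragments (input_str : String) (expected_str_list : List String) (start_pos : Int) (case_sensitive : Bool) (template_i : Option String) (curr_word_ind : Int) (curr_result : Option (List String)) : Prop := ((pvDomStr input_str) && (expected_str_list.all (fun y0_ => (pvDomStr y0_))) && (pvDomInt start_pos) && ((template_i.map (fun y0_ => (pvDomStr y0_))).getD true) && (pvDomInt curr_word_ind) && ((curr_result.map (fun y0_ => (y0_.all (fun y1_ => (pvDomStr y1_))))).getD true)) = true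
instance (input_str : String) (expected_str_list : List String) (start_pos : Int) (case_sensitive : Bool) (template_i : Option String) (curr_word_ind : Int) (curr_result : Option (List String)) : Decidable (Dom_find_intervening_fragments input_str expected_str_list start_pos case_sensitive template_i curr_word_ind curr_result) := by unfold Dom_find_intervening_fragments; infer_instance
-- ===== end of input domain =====

-- B replaces A's None-threading self-recursion (tail/continued results merged through
-- nested Option checks at every level, with case/template normalisation re-dispatched via
-- keyword arguments) by one up-front normalisation plus an explicit-stack loop over
-- (word index, search position, accumulated fragments) frames that appends each complete
-- decomposition to a result list (empty list <-> None); same return value, proved equal.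

-- bounds fact about Python's str.find(sub, start), cited by the ports' termination proofs
theorem pvFindFrom_bounds (s sub : String) (a : Int)
    (h : ¬ PySem.Str.findFrom s sub a none < 0) :
    a ≤ PySem.Str.findFrom s sub a none ∧
    PySem.Str.findFrom s sub a none ≤ (s.toList.length : Int) := by
  simp only [PySem.Str.findFrom_eq, PySem.Chars.findFrom] at h ⊢
  set n : Int := (s.toList.length : Int) with hn
  set st : Int := if a < 0 then if a + n < 0 then 0 else a + n else a with hst
  have hst0 : 0 ≤ st ∧ a ≤ st ∧ (st ≤ n ∨ st = a) := by
    rw [hst]; split_ifs <;> omega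
  have h1 := PySem.Chars.neg_one_le_find (List.drop st.toNat (List.take n.toNat s.toList)) sub.toList
  have h2 := PySem.Chars.find_le_length (List.drop st.toNat (List.take n.toNat s.toList)) sub.toList
  rw [List.length_drop, List.length_take] at h2
  simp only [hn] at *
  split at h
  · omega
  · split at h
    · omega
    · constructor <;> [skip; skip] <;> split <;> omega

-- ===== PORT A =====
def find_intervening_fragments (input_str : String) (expected_str_list : List String) (start_pos : Int) (case_sensitive : Bool) (template_i : Option String) (curr_word_ind : Int) (curr_result : Option (List String)) : Option (List (List String)) :=
  let last_ind : Int := PySem.Str.len input_str - (expected_str_list.map (fun i => PySem.Str.len i)).sum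
  if _h0 : last_ind < 0 then none
  else
    let istr := if case_sensitive then input_str else PySem.Str.lower input_str
    let elist := if case_sensitive then expected_str_list else expected_str_list.map (fun i => PySem.Str.lower i)
    let t : String := match template_i with
      | none => if case_sensitive then istr else input_str
      | some ti => ti
    match PySem.List.pyGet? elist curr_word_ind with
    | none => none                              -- except IndexError: return None
    | some curr_word =>
      let noff := PySem.Str.findFrom istr curr_word start_pos none
      if _h1 : noff < 0 then none
      else
        let tail_results :=
          if _h2 : noff < last_ind then
            find_intervening_fragments istr elist (1 + noff) true (some t) curr_word_ind none
          else none
        let curr_result' : List String := match curr_result with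
          | none => [PySem.Str.slice t none (some noff)]
          | some cr => cr ++ [PySem.Str.slice t (some start_pos) (some noff)]
        let cwi := curr_word_ind + 1
        let offset := noff + PySem.Str.len curr_word
        if _h3 : cwi ≥ (elist.length : Int) then
          some ([curr_result' ++ [PySem.Str.slice t (some offset) none]] ++ tail_results.getD [])
        else
          match find_intervening_fragments istr elist offset true (some t) cwi (some curr_result') with
          | none => tail_results
          | some c => some (c ++ tail_results.getD [])
termination_by (((expected_str_list.length : Int) - curr_word_ind).toNat,
                ((input_str.toList.length : Int) + 2 - start_pos).toNat)
decreasing_by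
  · -- tail call: same word index, strictly larger start position
    have hb := pvFindFrom_bounds istr curr_word start_pos _h1
    have hl : (istr.toList.length : Int) = (input_str.toList.length : Int) := by
      simp only [istr]
      split <;> simp [PySem.Str.toList_lower, PySem.Chars.lower]
    simp only [istr] at hb hl
    refine Prod.lex_iff.mpr (Or.inr ⟨?_, by omega⟩)
    cases case_sensitive <;> simp
  · -- continued call: word index strictly increases
    have he : (elist.length : Int) = (expected_str_list.length : Int) := by
      simp only [elist]; split <;> simp
    simp only [elist] at he _h3
    refine Prod.lex_iff.mpr (Or.inl (by omega))

-- ===== PORT B =====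
-- frame measure for the stack loop (termination only)
def pvB_M (s : String) (words : List String) (i frm : Int) : Nat :=
  ((words.length : Int) - i).toNat * (s.toList.length + 3) +
    (((s.toList.length : Int) + 2) - frm).toNat

def pvB_W (s : String) (words : List String) (stack : List (Int × Int × Option (List String))) : Nat :=
  (stack.map (fun fr => 3 ^ pvB_M s words fr.1 fr.2.1)).sum

theorem pvB_M_tail (s : String) (words : List String) (i frm q : Int)
    (hge : frm ≤ q) (hle : q ≤ (s.toList.length : Int)) :
    pvB_M s words i (q + 1) < pvB_M s words i frm := by
  unfold pvB_M; omega

theorem pvB_M_cont (s : String) (words : List String) (i frm q : Int)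
    (hq : 0 ≤ q) (hi : ¬ i + 1 ≥ (words.length : Int)) :
    pvB_M s words (i + 1) q < pvB_M s words i frm := by
  unfold pvB_M
  have h1 : ((words.length : Int) - (i + 1)).toNat + 1 = ((words.length : Int) - i).toNat := by omega
  have h2 : (((s.toList.length : Int) + 2) - q).toNat ≤ s.toList.length + 2 := by omega
  nlinarith [Nat.zero_le (((words.length : Int) - (i+1)).toNat * (s.toList.length + 3))]

-- the while loop of B: frames are (word index, search position, accumulated fragments)
def pvB_run (s t : String) (words : List String) (last : Int)
    (stack : List (Int × Int × Option (List String))) (out : List (List String)) :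
    List (List String) :=
  match stack with
  | [] => out
  | (i, frm, acc) :: rest =>
    match PySem.List.pyGet? words i with
    | none => pvB_run s t words last rest out          -- except IndexError: continue
    | some w =>
      let q := PySem.Str.findFrom s w frm none
      if hq : q < 0 then pvB_run s t words last rest out
      else
        let rest1 := if q < last then (i, q + 1, (none : Option (List String))) :: rest else rest
        let frags : List String := match acc with
          | none => [PySem.Str.slice t none (some q)]
          | some a => a ++ [PySem.Str.slice t (some frm) (some q)]
        let nxt := q + PySem.Str.len w
        if hn : i + 1 ≥ (words.length : Int) then
          pvB_run s t words last rest1 (out ++ [frags ++ [PySem.Str.slice t (some nxt) none]])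
        else
          pvB_run s t words last ((i + 1, nxt, some frags) :: rest1) out
termination_by pvB_W s words stack
decreasing_by
  all_goals try
    simp only [pvB_W, List.map_cons, List.sum_cons]
    have h0 : 0 < 3 ^ pvB_M s words i frm := Nat.pow_pos (by norm_num)
    omega
  all_goals try
    have hb := pvFindFrom_bounds s w frm hq
    have ht := pvB_M_tail s words i frm q hb.1 hb.2
    simp only [pvB_W, List.map_cons, List.sum_cons, q] at ht ⊢
    split
    · simp only [List.map_cons, List.sum_cons]
      have := Nat.pow_lt_pow_right (by norm_num : 1 < 3) ht
      omega
    · have h0 : 0 < 3 ^ pvB_M s words i frm := Nat.pow_pos (by norm_num)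
      omega
  all_goals
    have hb := pvFindFrom_bounds s w frm hq
    have ht := pvB_M_tail s words i frm q hb.1 hb.2
    have hc := pvB_M_cont s words i frm nxt (by simp only [nxt, PySem.Str.len_eq]; omega) hn
    simp only [pvB_W, List.map_cons, List.sum_cons, q, nxt] at ht hc ⊢
    have h3 : ∀ m, m < pvB_M s words i frm → 3 ^ m ≤ 3 ^ (pvB_M s words i frm - 1) :=
      fun m hm => Nat.pow_le_pow_right (by norm_num) (by omega)
    have hM : 1 ≤ pvB_M s words i frm := by omega
    have hpow : 3 ^ (pvB_M s words i frm - 1) + 3 ^ (pvB_M s words i frm - 1) < 3 ^ pvB_M s words i frm := by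
      have h5 : 3 ^ pvB_M s words i frm = 3 ^ (pvB_M s words i frm - 1) * 3 := by
        rw [← Nat.pow_succ]; congr 1; omega
      have hp : 0 < 3 ^ (pvB_M s words i frm - 1) := Nat.pow_pos (by norm_num)
      omega
    split
    · simp only [List.map_cons, List.sum_cons]
      have e1 := h3 _ ht
      have e2 := h3 _ hc
      omega
    · have e2 := h3 _ hc
      have h0 : 0 < 3 ^ pvB_M s words i frm := Nat.pow_pos (by norm_num)
      omega

def find_intervening_fragments_alt (input_str : String) (expected_str_list : List String) (start_pos : Int) (case_sensitive : Bool) (template_i : Option String) (curr_word_ind : Int) (curr_result : Option (List String)) : Option (List (List String)) :=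
  let t : String := match template_i with
    | none => input_str
    | some ti => ti
  let s := if case_sensitive then input_str else PySem.Str.lower input_str
  let words := if case_sensitive then expected_str_list else expected_str_list.map (fun w => PySem.Str.lower w)
  let last : Int := PySem.Str.len s - (words.map (fun w => PySem.Str.len w)).sum
  if last < 0 then none
  else
    let out := pvB_run s t words last [(curr_word_ind, start_pos, curr_result)] []
    if out = [] then none else some out

-- ===== PRECONDITION & SPEC =====
-- (no Pre_: the Python A returns normally on every well-typed input)
def Spec_find_intervening_fragments (input_str : String) (expected_str_list : List String) (start_pos : Int) (case_sensitive : Bool) (template_i : Option String) (curr_word_ind : Int) (curr_result : Option (List String)) (out : Option (List (List String))) : Prop := out = find_intervening_fragments_alt input_str expected_str_list start_pos case_sensitive template_i curr_word_ind curr_result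
instance (input_str : String) (expected_str_list : List String) (start_pos : Int) (case_sensitive : Bool) (template_i : Option String) (curr_word_ind : Int) (curr_result : Option (List String)) (out : Option (List (List String))) : Decidable (Spec_find_intervening_fragments input_str expected_str_list start_pos case_sensitive template_i curr_word_ind curr_result out) := by unfold Spec_find_intervening_fragments; infer_instance

-- ===== CLAIM (what is proved, stated in full; the proofs are below) =====
def Claim_equal_find_intervening_fragments : Prop := ∀ (input_str : String) (expected_str_list : List String) (start_pos : Int) (case_sensitive : Bool) (template_i : Option String) (curr_word_ind : Int) (curr_result : Option (List String)), Dom_find_intervening_fragments input_str expected_str_list start_pos case_sensitive template_i curr_word_ind curr_result → Spec_find_intervening_fragments input_str expected_str_list start_pos case_sensitive template_i curr_word_ind curr_result (find_intervening_fragments input_str expected_str_list start_pos case_sensitive template_i curr_word_ind curr_result)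

-- ===== LEMMAS AND PROOFS =====

-- A's recursion after normalisation (case_sensitive=True, template fixed): one function of (i, p, acc)
def pvFrags (t : String) (p q : Int) (acc : Option (List String)) : List String :=
  match acc with
  | none => [PySem.Str.slice t none (some q)]
  | some cr => cr ++ [PySem.Str.slice t (some p) (some q)]

def pvF (s t : String) (words : List String) (last : Int) (i p : Int) (acc : Option (List String)) : Option (List (List String)) :=
  match PySem.List.pyGet? words i with
  | none => none
  | some w =>
    let q := PySem.Str.findFrom s w p none
    if _h1 : q < 0 then none
    else
      let tail := if _h2 : q < last then pvF s t words last i (1 + q) none else none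
      let acc' : List String := pvFrags t p q acc
      if _h3 : i + 1 ≥ (words.length : Int) then
        some ([acc' ++ [PySem.Str.slice t (some (q + PySem.Str.len w)) none]] ++ tail.getD [])
      else
        match pvF s t words last (i + 1) (q + PySem.Str.len w) (some acc') with
        | none => tail
        | some c => some (c ++ tail.getD [])
termination_by (((words.length : Int) - i).toNat, ((s.toList.length : Int) + 2 - p).toNat)
decreasing_by
  · have hb := pvFindFrom_bounds s w p _h1
    refine Prod.lex_iff.mpr (Or.inr ⟨rfl, by omega⟩)
  · refine Prod.lex_iff.mpr (Or.inl (by omega))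

def pvG (s t : String) (words : List String) (last : Int) (i p : Int) (acc : Option (List String)) : List (List String) :=
  (pvF s t words last i p acc).getD []

theorem pvF_ne_nil (s t : String) (words : List String) (last : Int) (i p : Int)
    (acc : Option (List String)) : pvF s t words last i p acc ≠ some [] := by
  fun_induction pvF s t words last i p acc
  · simp_all
  · simp_all
  · simp_all
  · rename_i tl ac hq hlt hnone ih
    simp only [tl]
    split <;> simp_all
  · simp_all

theorem pvG_none (s t : String) (words : List String) (last : Int) (i p : Int)
    (acc : Option (List String)) (hw : PySem.List.pyGet? words i = none) :
    pvG s t words last i p acc = [] := by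
  unfold pvG
  rw [pvF.eq_def, hw]
  rfl

theorem pvG_neg (s t : String) (words : List String) (last : Int) (i p : Int)
    (acc : Option (List String)) (w : String)
    (hw : PySem.List.pyGet? words i = some w)
    (hq : PySem.Str.findFrom s w p none < 0) :
    pvG s t words last i p acc = [] := by
  unfold pvG
  rw [pvF.eq_def, hw]
  simp only [dif_pos hq, Option.getD_none]

theorem pvG_step (s t : String) (words : List String) (last : Int) (i p : Int)
    (acc : Option (List String)) (w : String)
    (hw : PySem.List.pyGet? words i = some w)
    (hq : ¬ PySem.Str.findFrom s w p none < 0) :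
    pvG s t words last i p acc =
      (if i + 1 ≥ (words.length : Int)
       then [pvFrags t p (PySem.Str.findFrom s w p none) acc ++
              [PySem.Str.slice t (some (PySem.Str.findFrom s w p none + PySem.Str.len w)) none]]
       else pvG s t words last (i + 1) (PySem.Str.findFrom s w p none + PySem.Str.len w)
              (some (pvFrags t p (PySem.Str.findFrom s w p none) acc)))
      ++ (if PySem.Str.findFrom s w p none < last
          then pvG s t words last i (1 + PySem.Str.findFrom s w p none) none else []) := by
  unfold pvG
  conv_lhs => rw [pvF.eq_def]
  rw [hw]
  simp only [dif_neg hq]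
  split
  · split
    · simp
    · simp
  · split
    · rename_i hc
      rw [hc]
      split <;> simp
    · rename_i c hc
      rw [hc]
      split <;> simp

theorem pvB_run_eq (s t : String) (words : List String) (last : Int)
    (stack : List (Int × Int × Option (List String))) (out : List (List String)) :
    pvB_run s t words last stack out =
      out ++ (stack.map (fun fr => pvG s t words last fr.1 fr.2.1 fr.2.2)).flatten := by
  fun_induction pvB_run s t words last stack out
  · simp
  · -- popped frame has no word at its index: it contributes nothing
    rename_i out i frm acc rest hw ih
    rw [ih]
    simp [pvG_none s t words last i frm acc hw]
  · -- word not found: the frame contributes nothing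
    rename_i out i frm acc rest w hw q hq ih
    simp only [q] at hq
    rw [ih]
    simp [pvG_neg s t words last i frm acc w hw hq]
  · -- word found, last word: one decomposition appended, tail frame pushed
    rename_i out i frm acc rest w hw q hq rest1 frags nxt hn ih
    simp only [q] at hq
    rw [ih]
    simp only [List.map_cons, List.flatten_cons]
    rw [pvG_step s t words last i frm acc w hw hq]
    simp only [if_pos hn, rest1, frags, nxt, pvFrags, q]
    have hcomm : 1 + PySem.Str.findFrom s w frm none = PySem.Str.findFrom s w frm none + 1 := by
      omega
    rw [hcomm]
    by_cases hc : PySem.Chars.findFrom s.toList w.toList frm none < last <;> simp [hc]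
  · -- word found, more words remain: continuation and tail frames pushed
    rename_i out i frm acc rest w hw q hq rest1 frags nxt hn ih
    simp only [q] at hq
    rw [ih]
    simp only [List.map_cons, List.flatten_cons]
    rw [pvG_step s t words last i frm acc w hw hq]
    simp only [if_neg hn, rest1, frags, nxt, pvFrags, q]
    have hcomm : 1 + PySem.Str.findFrom s w frm none = PySem.Str.findFrom s w frm none + 1 := by
      omega
    rw [hcomm]
    by_cases hc : PySem.Chars.findFrom s.toList w.toList frm none < last <;> simp [hc]

theorem pvA_norm (s t : String) (words : List String) (i p : Int) (acc : Option (List String))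
    (hlast : ¬ (PySem.Str.len s - (words.map (fun w => PySem.Str.len w)).sum < 0)) :
    find_intervening_fragments s words p true (some t) i acc =
      pvF s t words (PySem.Str.len s - (words.map (fun w => PySem.Str.len w)).sum) i p acc := by
  fun_induction pvF s t words (PySem.Str.len s - (words.map (fun w => PySem.Str.len w)).sum) i p acc
  · -- word index out of range
    rename_i i p acc hw
    rw [find_intervening_fragments.eq_def]
    simp [hw]
  · -- word not found
    rename_i i p acc w hw q hq
    simp only [q] at hq
    rw [find_intervening_fragments.eq_def]
    simp [hw]
    intro _ h
    simp only [PySem.Str.findFrom_eq] at hq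
    omega
  · -- last word placed
    rename_i i p acc w hw q hq tl ac hn ihtl
    simp only [q] at hq ihtl ⊢
    rw [find_intervening_fragments.eq_def]
    simp only [dif_neg hlast, reduceIte, hw, dif_neg hq, dif_pos hn, ihtl, pvFrags, tl, ac, q]
  · -- more words, continued search failed
    rename_i i p acc w hw q hq tl ac hn hnone ihtl ihcont
    simp only [q] at hq hnone ihtl ihcont ⊢
    simp only [tl, ac, q, pvFrags] at hnone ihtl ihcont
    rw [find_intervening_fragments.eq_def]
    simp only [dif_neg hlast, reduceIte, hw, dif_neg hq, dif_neg hn, pvFrags, tl, ac, q,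
      ihcont, ihtl, hnone]
  · -- more words, continued search succeeded
    rename_i i p acc w hw q hq tl ac hn c hsome ihtl ihcont
    simp only [q] at hq hsome ihtl ihcont ⊢
    simp only [tl, ac, q, pvFrags] at hsome ihtl ihcont
    rw [find_intervening_fragments.eq_def]
    simp only [dif_neg hlast, reduceIte, hw, dif_neg hq, dif_neg hn, pvFrags, tl, ac, q,
      ihcont, ihtl, hsome]

theorem pvLenLower (x : String) : PySem.Str.len (PySem.Str.lower x) = PySem.Str.len x := by
  simp [PySem.Str.len_eq, PySem.Str.toList_lower, PySem.Chars.lower]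

theorem pvSumLower (l : List String) :
    ((l.map (fun w => PySem.Str.lower w)).map (fun w => PySem.Str.len w)).sum
      = (l.map (fun w => PySem.Str.len w)).sum := by
  simp only [List.map_map]
  congr 1
  exact List.map_congr_left (fun x _ => pvLenLower x)

theorem pvA_tnone (input : String) (lst : List String) (p : Int) (cs : Bool) (i : Int)
    (acc : Option (List String)) :
    find_intervening_fragments input lst p cs none i acc =
      find_intervening_fragments input lst p cs (some input) i acc := by
  rw [find_intervening_fragments.eq_def, find_intervening_fragments.eq_def]
  cases cs <;> rfl

theorem pvA_false (input x : String) (lst : List String) (p i : Int) (acc : Option (List String))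
    (hlast : ¬ (PySem.Str.len input - (lst.map (fun w => PySem.Str.len w)).sum < 0)) :
    find_intervening_fragments input lst p false (some x) i acc =
      pvF (PySem.Str.lower input) x (lst.map (fun w => PySem.Str.lower w))
        (PySem.Str.len (PySem.Str.lower input)
          - (((lst.map (fun w => PySem.Str.lower w)).map (fun w => PySem.Str.len w)).sum))
        i p acc := by
  have hEq : PySem.Str.len (PySem.Str.lower input)
      - (((lst.map (fun w => PySem.Str.lower w)).map (fun w => PySem.Str.len w)).sum)
      = PySem.Str.len input - (lst.map (fun w => PySem.Str.len w)).sum := by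
    rw [pvLenLower, pvSumLower]
  have hlast' : ¬ (PySem.Str.len (PySem.Str.lower input)
      - (((lst.map (fun w => PySem.Str.lower w)).map (fun w => PySem.Str.len w)).sum) < 0) := by
    rw [hEq]; exact hlast
  rw [find_intervening_fragments.eq_def]
  conv_rhs => rw [pvF.eq_def]
  simp only [Bool.false_eq_true, reduceIte, dif_neg hlast]
  cases hw : PySem.List.pyGet? (lst.map (fun w => PySem.Str.lower w)) i with
  | none => rfl
  | some w =>
    by_cases hq : PySem.Str.findFrom (PySem.Str.lower input) w p none < 0
    · simp only [dif_pos hq]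
    · simp only [dif_neg hq, pvFrags, hEq,
        pvA_norm (PySem.Str.lower input) x (lst.map (fun w => PySem.Str.lower w)) i
          (1 + PySem.Str.findFrom (PySem.Str.lower input) w p none) none hlast',
        pvA_norm (PySem.Str.lower input) x (lst.map (fun w => PySem.Str.lower w)) (i + 1)
          (PySem.Str.findFrom (PySem.Str.lower input) w p none + PySem.Str.len w)
          (some ((match acc with
            | none => [PySem.Str.slice x none (some (PySem.Str.findFrom (PySem.Str.lower input) w p none))]
            | some cr => cr ++ [PySem.Str.slice x (some p) (some (PySem.Str.findFrom (PySem.Str.lower input) w p none))]))) hlast']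

theorem pvA_top (input : String) (lst : List String) (p : Int) (cs : Bool) (ti : Option String)
    (i : Int) (acc : Option (List String))
    (hlast : ¬ (PySem.Str.len input - (lst.map (fun w => PySem.Str.len w)).sum < 0)) :
    find_intervening_fragments input lst p cs ti i acc =
      pvF (if cs then input else PySem.Str.lower input)
          (match ti with | none => input | some x => x)
          (if cs then lst else lst.map (fun w => PySem.Str.lower w))
          (PySem.Str.len (if cs then input else PySem.Str.lower input)
            - (((if cs then lst else lst.map (fun w => PySem.Str.lower w)).map
                  (fun w => PySem.Str.len w)).sum))
          i p acc := by
  cases cs with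
  | false =>
    cases ti with
    | none => rw [pvA_tnone]; simpa using pvA_false input input lst p i acc hlast
    | some x => simpa using pvA_false input x lst p i acc hlast
  | true =>
    cases ti with
    | none => rw [pvA_tnone]; simpa using pvA_norm input input lst i p acc hlast
    | some x => simpa using pvA_norm input x lst i p acc hlast

theorem pvB_tnone (input : String) (lst : List String) (p : Int) (cs : Bool) (i : Int)
    (acc : Option (List String)) :
    find_intervening_fragments_alt input lst p cs none i acc =
      find_intervening_fragments_alt input lst p cs (some input) i acc := rfl

theorem pvMainSome (input_str : String) (expected_str_list : List String) (start_pos : Int)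
    (case_sensitive : Bool) (x : String) (curr_word_ind : Int)
    (curr_result : Option (List String)) :
    find_intervening_fragments input_str expected_str_list start_pos case_sensitive
        (some x) curr_word_ind curr_result
      = find_intervening_fragments_alt input_str expected_str_list start_pos case_sensitive
          (some x) curr_word_ind curr_result := by
  have hEq : PySem.Str.len (if case_sensitive then input_str else PySem.Str.lower input_str)
      - (((if case_sensitive then expected_str_list
           else expected_str_list.map (fun w => PySem.Str.lower w)).map
            (fun w => PySem.Str.len w)).sum)
      = PySem.Str.len input_str - (expected_str_list.map (fun w => PySem.Str.len w)).sum := by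
    cases case_sensitive
    · simp only [Bool.false_eq_true, reduceIte]
      rw [pvLenLower, pvSumLower]
    · simp only [reduceIte]
  by_cases hlast : PySem.Str.len input_str
      - (expected_str_list.map (fun w => PySem.Str.len w)).sum < 0
  · -- the words cannot fit: both sides return none
    have hB : PySem.Str.len (if case_sensitive then input_str else PySem.Str.lower input_str)
        - (((if case_sensitive then expected_str_list
             else expected_str_list.map (fun w => PySem.Str.lower w)).map
              (fun w => PySem.Str.len w)).sum) < 0 := by
      rw [hEq]; exact hlast
    rw [find_intervening_fragments.eq_def]
    simp only [find_intervening_fragments_alt, dif_pos hlast, if_pos hB]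
  · have hB : ¬ (PySem.Str.len (if case_sensitive then input_str else PySem.Str.lower input_str)
        - (((if case_sensitive then expected_str_list
             else expected_str_list.map (fun w => PySem.Str.lower w)).map
              (fun w => PySem.Str.len w)).sum) < 0) := by
      rw [hEq]; exact hlast
    rw [pvA_top input_str expected_str_list start_pos case_sensitive (some x)
        curr_word_ind curr_result hlast]
    simp only [find_intervening_fragments_alt, if_neg hB]
    rw [pvB_run_eq]
    simp only [List.map_cons, List.map_nil, List.flatten_cons, List.flatten_nil,
      List.nil_append, List.append_nil]
    cases hv : pvF (if case_sensitive then input_str else PySem.Str.lower input_str) x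
        (if case_sensitive then expected_str_list
         else expected_str_list.map (fun w => PySem.Str.lower w))
        (PySem.Str.len (if case_sensitive then input_str else PySem.Str.lower input_str)
          - (((if case_sensitive then expected_str_list
               else expected_str_list.map (fun w => PySem.Str.lower w)).map
                (fun w => PySem.Str.len w)).sum))
        curr_word_ind start_pos curr_result with
    | none =>
      simp only [PySem.Str.len_eq, String.length_toList] at hv ⊢
      simp [pvG, hv]
    | some l =>
      have hne : l ≠ [] := by
        intro h
        exact pvF_ne_nil _ _ _ _ _ _ _ (h ▸ hv)
      simp only [PySem.Str.len_eq, String.length_toList] at hv ⊢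
      simp [pvG, hv, hne]

theorem pvMain (input_str : String) (expected_str_list : List String) (start_pos : Int)
    (case_sensitive : Bool) (template_i : Option String) (curr_word_ind : Int)
    (curr_result : Option (List String)) :
    find_intervening_fragments input_str expected_str_list start_pos case_sensitive
        template_i curr_word_ind curr_result
      = find_intervening_fragments_alt input_str expected_str_list start_pos case_sensitive
          template_i curr_word_ind curr_result := by
  cases template_i with
  | none =>
    rw [pvA_tnone, pvB_tnone]
    exact pvMainSome input_str expected_str_list start_pos case_sensitive input_str
      curr_word_ind curr_result
  | some x =>
    exact pvMainSome input_str expected_str_list start_pos case_sensitive x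
      curr_word_ind curr_result

-- ===== VERDICT (by name: the statement is the Claim_ definition above) =====
theorem find_intervening_fragments_spec : Claim_equal_find_intervening_fragments := by
  intro input_str expected_str_list start_pos case_sensitive template_i curr_word_ind curr_result _
  unfold Spec_find_intervening_fragments
  exact pvMain input_str expected_str_list start_pos case_sensitive template_i
    curr_word_ind curr_result
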